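-- pv_equiv track=rewrite | github.com/mobinagoodarzi/pro1 | solution.py | solve
-- ===== SOURCE A (Python) =====
-- def solve(arr, partial, k, left, right):
--     if left == right:
--         partial[left] = arr[left] if left == 0 else partial[left - 1] + arr[left]
--         return int(arr[left] % k == 0) + int(partial[left] % k == 0)
--
--     m = left + (right - left) // 2
--
--     ans = solve(arr, partial, k, left, m) + solve(arr, partial, k, m+1, right)
--
--     for l in range(left, m+1):
--         for r in range(m+1, left+1):
--             ans += int((partial[r] - partial[l]) % k == 0)
--
--     return ans
-- ===== SOURCE B (Python) =====
-- def solve(arr, partial, k, left, right):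
--     ans = 0
--     prev = 0 if left == 0 else partial[left - 1]
--     for i in range(left, right + 1):
--         cur = arr[i] if i == 0 else prev + arr[i]
--         partial[i] = cur
--         prev = cur
--         ans += int(arr[i] % k == 0) + int(cur % k == 0)
--     return ans
-- ===== Notes on version B (the rewrite author's own statement) =====
-- stated objective: simpler
-- what changed: Replaces the divide-and-conquer recursion (whose cross-boundary double loop is dead code, since range(m+1,left+1) is always empty) by a single forward loop that carries the running prefix value and accumulates both divisibility counts; it performs the same in-place writes to partial.
import Mathlib
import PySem

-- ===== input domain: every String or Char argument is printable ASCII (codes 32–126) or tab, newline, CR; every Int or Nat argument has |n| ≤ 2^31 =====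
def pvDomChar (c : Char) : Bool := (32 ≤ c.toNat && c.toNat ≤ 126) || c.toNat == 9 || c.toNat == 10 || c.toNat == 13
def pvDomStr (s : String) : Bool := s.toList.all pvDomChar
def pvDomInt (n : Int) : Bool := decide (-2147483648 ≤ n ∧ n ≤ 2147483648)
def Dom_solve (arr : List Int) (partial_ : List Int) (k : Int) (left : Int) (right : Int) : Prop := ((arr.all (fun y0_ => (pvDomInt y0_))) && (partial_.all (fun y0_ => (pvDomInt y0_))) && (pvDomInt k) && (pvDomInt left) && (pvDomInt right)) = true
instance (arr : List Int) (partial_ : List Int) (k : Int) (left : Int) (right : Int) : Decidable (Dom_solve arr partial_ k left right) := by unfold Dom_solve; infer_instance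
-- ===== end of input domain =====

-- B replaces A's divide-and-conquer (with its always-empty cross-boundary double loop) by one
-- forward loop carrying the running prefix value; both mutate `partial` identically in Python,
-- and the theorems here are about the return value.


-- helpers shared by both ports: Python indexing xs[i] / xs[i]=v (exact incl. negative wrap on Pre_'s
-- in-range indices) and int(x % k == 0)
def gp (xs : List Int) (i : Int) : Int := PySem.List.pyGetD xs i 0
def sp (xs : List Int) (i : Int) (v : Int) : List Int := PySem.List.pySetD xs i v
def cnt (k x : Int) : Int := if PySem.Int.mod x k = 0 then 1 else 0

-- ===== PORT A =====
-- the Python mutates `partial` in place; the port threads it as the second state component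
def solveRec (arr p : List Int) (k left right : Int) : Int × List Int :=
  if left = right then
    let v := if left = 0 then gp arr left else gp p (left - 1) + gp arr left
    (cnt k (gp arr left) + cnt k v, sp p left v)
  else if _h : left < right then
    let m := left + PySem.Int.floordiv (right - left) 2
    let r1 := solveRec arr p k left m
    let r2 := solveRec arr r1.2 k (m + 1) right
    let ans := r1.1 + r2.1
    -- the dead cross-boundary double loop, transliterated (the inner range is empty)
    let ans2 := (PySem.List.pyRange left (m + 1)).foldl
      (fun acc l => (PySem.List.pyRange (m + 1) (left + 1)).foldl
        (fun acc2 r => acc2 + cnt k (gp r2.2 r - gp r2.2 l)) acc) ans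
    (ans2, r2.2)
  else (0, p)  -- Python never returns when left > right (infinite recursion); excluded by Pre_
termination_by (right - left).toNat
decreasing_by
  all_goals
    rw [PySem.Int.floordiv_eq_ediv_of_pos (by omega : (0:Int) < 2)]
    omega

def solve (arr : List Int) (partial_ : List Int) (k : Int) (left : Int) (right : Int) : Int :=
  (solveRec arr partial_ k left right).1

-- ===== PORT B =====
def solve_alt (arr : List Int) (partial_ : List Int) (k : Int) (left : Int) (right : Int) : Int :=
  let prev0 : Int := if left = 0 then 0 else gp partial_ (left - 1)
  let st := (PySem.List.pyRange left (right + 1)).foldl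
    (fun (st : Int × Int × List Int) i =>
      let ai := gp arr i
      let cur := if i = 0 then ai else st.2.1 + ai
      (st.1 + (cnt k ai + cnt k cur), cur, sp st.2.2 i cur))
    (0, prev0, partial_)
  st.1

-- ===== PRECONDITION & SPEC =====
-- Exactly where the Python A returns: k ≠ 0 (no ZeroDivisionError), left ≤ right (otherwise the
-- recursion never bottoms out), and every index the bases touch is a valid Python index
-- (left..right into arr and partial, and left-1 into partial unless left = 0).
def Pre_solve (arr : List Int) (partial_ : List Int) (k : Int) (left : Int) (right : Int) : Prop :=
  k ≠ 0 ∧ left ≤ right ∧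
  PySem.Raise.InRange arr.length left ∧ PySem.Raise.InRange arr.length right ∧
  PySem.Raise.InRange partial_.length right ∧
  (left = 0 ∨ PySem.Raise.InRange partial_.length (left - 1))
instance (arr : List Int) (partial_ : List Int) (k : Int) (left : Int) (right : Int) : Decidable (Pre_solve arr partial_ k left right) := by unfold Pre_solve; infer_instance

def pvWitness_solve : List Int × List Int × Int × Int × Int := ([6, 1, 4], [0, 0, 0], 2, 0, 2)

def Spec_solve (arr : List Int) (partial_ : List Int) (k : Int) (left : Int) (right : Int) (out : Int) : Prop := out = solve_alt arr partial_ k left right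
instance (arr : List Int) (partial_ : List Int) (k : Int) (left : Int) (right : Int) (out : Int) : Decidable (Spec_solve arr partial_ k left right out) := by unfold Spec_solve; infer_instance

-- ===== CLAIM (what is proved, stated in full; the proofs are below) =====
def Claim_equal_solve : Prop := ∀ (arr : List Int) (partial_ : List Int) (k : Int) (left : Int) (right : Int), Dom_solve arr partial_ k left right → Pre_solve arr partial_ k left right → Spec_solve arr partial_ k left right (solve arr partial_ k left right)

-- ===== LEMMAS AND PROOFS =====

-- reference forward recursion: one index per step, same state (count, partial)
def run (arr p : List Int) (k left right : Int) : Int × List Int :=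
  if right < left then (0, p)
  else
    let ai := gp arr left
    let v := if left = 0 then ai else gp p (left - 1) + ai
    let r := run arr (sp p left v) k (left + 1) right
    (cnt k ai + cnt k v + r.1, r.2)
termination_by (right + 1 - left).toNat

-- reading back the slot just written (Python negative-wrap indexing), on in-range indices
lemma gp_sp_self (p : List Int) (i v : Int) (h : PySem.Raise.InRange p.length i) :
    gp (sp p i v) i = v := by
  obtain ⟨h1, h2⟩ := h
  by_cases hi : 0 ≤ i
  · simp [gp, sp, PySem.List.pyGetD, PySem.List.pySetD, PySem.List.pyGet?, PySem.List.pySet?,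
      PySem.List.pyIdx?, hi, h2, show i.toNat < p.length by omega]
  · simp [gp, sp, PySem.List.pyGetD, PySem.List.pySetD, PySem.List.pyGet?, PySem.List.pySet?,
      PySem.List.pyIdx?, hi, h1,
      show p.length - (-i).toNat < p.length by omega]

lemma length_sp (p : List Int) (i v : Int) : (sp p i v).length = p.length := by
  simp [sp, PySem.List.length_pySetD]

lemma foldl_const (l : List Int) (a : Int) : l.foldl (fun acc _ => acc) a = a := by
  induction l generalizing a with
  | nil => rfl
  | cons x t ih => simp only [List.foldl_cons]; exact ih a

-- splitting the forward recursion at any midpoint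
lemma run_split (arr : List Int) (k : Int) : ∀ (n : Nat) (left m right : Int) (p : List Int),
    (m - left).toNat = n → left ≤ m → m < right →
    run arr p k left right =
      ((run arr p k left m).1 + (run arr (run arr p k left m).2 k (m + 1) right).1,
       (run arr (run arr p k left m).2 k (m + 1) right).2) := by
  intro n
  induction n with
  | zero =>
    intro left m right p hn hlm hmr
    have hm : m = left := by omega
    subst hm
    rw [run, run, if_neg (by omega), if_neg (by omega)]
    simp only
    rw [show run arr (sp p m (if m = 0 then gp arr m else gp p (m - 1) + gp arr m)) k (m + 1) m
          = (0, sp p m (if m = 0 then gp arr m else gp p (m - 1) + gp arr m)) by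
        rw [run, if_pos (by omega)]]
    simp only
    ring_nf
  | succ n ih =>
    intro left m right p hn hlm hmr
    have hlm' : left < m := by omega
    rw [run, run, if_neg (by omega), if_neg (by omega)]
    simp only
    rw [ih (left + 1) m right _ (by omega) (by omega) hmr]
    ring_nf

-- A's recursion equals the forward recursion (no side conditions beyond left ≤ right)
lemma solveRec_eq_run (arr : List Int) (k : Int) : ∀ (n : Nat) (left right : Int) (p : List Int),
    (right - left).toNat = n → left ≤ right →
    solveRec arr p k left right = run arr p k left right := by
  intro n
  induction n using Nat.strong_induction_on with
  | _ n ih =>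
    intro left right p hn hlr
    rcases eq_or_lt_of_le hlr with heq | hlt
    · subst heq
      rw [solveRec, if_pos rfl, run, if_neg (show ¬ left < left by omega)]
      simp only
      rw [show run arr (sp p left (if left = 0 then gp arr left else gp p (left - 1) + gp arr left))
            k (left + 1) left
          = (0, sp p left (if left = 0 then gp arr left else gp p (left - 1) + gp arr left)) by
          rw [run, if_pos (show left < left + 1 by omega)]]
      simp
    · rw [solveRec, if_neg (by omega), dif_pos hlt]
      simp only
      have hdiv : PySem.Int.floordiv (right - left) 2 = (right - left) / 2 :=
        PySem.Int.floordiv_eq_ediv_of_pos (by omega)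
      set m := left + PySem.Int.floordiv (right - left) 2 with hm
      have hmb : left ≤ m ∧ m < right := by rw [hm, hdiv]; omega
      -- the inner range of the double loop is empty
      rw [PySem.List.pyRange_one_eq_nil (show left + 1 ≤ m + 1 by omega)]
      simp only [List.foldl_nil, foldl_const]
      rw [ih (m - left).toNat (by omega) left m p rfl (by omega),
          ih (right - (m + 1)).toNat (by omega) (m + 1) right _ rfl (by omega),
          run_split arr k (m - left).toNat left m right p rfl (by omega) (by omega)]

-- B's single fold equals the forward recursion; the running `prev` mirrors the slot written last
lemma fold_eq_run (arr : List Int) (k : Int) : ∀ (n : Nat) (left right : Int) (p : List Int)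
    (prev ans : Int),
    (right + 1 - left).toNat = n →
    -(p.length : Int) ≤ left → right < (p.length : Int) →
    (left ≠ 0 → prev = gp p (left - 1)) →
    (PySem.List.pyRange left (right + 1)).foldl
      (fun (st : Int × Int × List Int) i =>
        let ai := gp arr i
        let cur := if i = 0 then ai else st.2.1 + ai
        (st.1 + (cnt k ai + cnt k cur), cur, sp st.2.2 i cur))
      (ans, prev, p)
    = (ans + (run arr p k left right).1,
       (if right < left then prev else gp (run arr p k left right).2 right),
       (run arr p k left right).2) := by
  intro n
  induction n with
  | zero =>
    intro left right p prev ans hn hlo hhi hprev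
    have hrl : right < left := by omega
    rw [PySem.List.pyRange_one_eq_nil (by omega), run, if_pos hrl]
    simp [hrl]
  | succ n ih =>
    intro left right p prev ans hn hlo hhi hprev
    have hlr : left ≤ right := by omega
    rw [PySem.List.pyRange_one_cons (show left < right + 1 by omega), List.foldl_cons]
    simp only
    set v := if left = 0 then gp arr left else prev + gp arr left with hv
    have hv' : v = if left = 0 then gp arr left else gp p (left - 1) + gp arr left := by
      rw [hv]; split_ifs with h0
      · rfl
      · rw [hprev h0]
    have hin : PySem.Raise.InRange p.length left := ⟨hlo, by omega⟩
    rw [ih (left + 1) right (sp p left v) v (ans + (cnt k (gp arr left) + cnt k v))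
        (by omega) (by rw [length_sp]; omega) (by rw [length_sp]; omega)
        (fun _ => by rw [show left + 1 - 1 = left by ring, gp_sp_self p left v hin])]
    conv_rhs => rw [run, if_neg (show ¬ right < left by omega)]
    simp only [← hv', Prod.mk.injEq]
    refine ⟨by ring, ?_, trivial⟩
    split_ifs with h1 h2 h2
    · omega
    · -- right < left + 1 and ¬ right < left : here right = left
      have : right = left := by omega
      subst this
      rw [show run arr (sp p right v) k (right + 1) right = (0, sp p right v) by
          rw [run, if_pos (show right < right + 1 by omega)]]
      exact (gp_sp_self p right v hin).symm
    · omega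
    · rfl

-- ===== VERDICT (by name: the statement is the Claim_ definition above) =====
theorem solve_spec : Claim_equal_solve := by
  intro arr partial_ k left right _hdom hpre
  obtain ⟨hk, hlr, _ha1, _ha2, ⟨hpl, hpr⟩, hp0⟩ := hpre
  simp only [Spec_solve, solve, solve_alt]
  have hlo : -(partial_.length : Int) ≤ left := by
    rcases hp0 with h0 | ⟨h1, _⟩ <;> omega
  rw [solveRec_eq_run arr k (right - left).toNat left right partial_ rfl hlr]
  rw [fold_eq_run arr k (right + 1 - left).toNat left right partial_
      (if left = 0 then 0 else gp partial_ (left - 1)) 0 rfl hlo hpr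
      (fun h0 => if_neg h0)]
  simp
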